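-- pv_equiv track=rewrite | github.com/kcw36/Internationalization-Puzzles | mojibake/mojibake.py | complete_crossword
-- ===== SOURCE A (Python) =====
-- def complete_crossword(words: list[str], puzzle: list[str]) -> int:
--     """Return complete puzzle using word list."""
--     count = 0
--     for cryptic in puzzle:
--         cryptic = cryptic.lstrip()
--         size = len(cryptic)
--         key = {}
--         for i, c in enumerate(cryptic):
--             if c.isalpha():
--                 key["letter"] = c
--                 key["index"] = i
--         new_words = [w for w in words if len(w) == size]
--         for i, w in enumerate(new_words):
--             if w[key["index"]] == key["letter"]:
--                 count += words.index(w)+1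
--     return count
-- ===== SOURCE B (Python) =====
-- def complete_crossword(words: list[str], puzzle: list[str]) -> int:
--     """Return complete puzzle using word list."""
--     first = {}
--     table = {}
--     for i, w in enumerate(words):
--         fi = first.setdefault(w, i)
--         for p, ch in enumerate(w):
--             k = (len(w), p, ch)
--             table[k] = table.get(k, 0) + fi + 1
--     count = 0
--     for cryptic in puzzle:
--         s = cryptic.lstrip()
--         idx = max(j for j, c in enumerate(s) if c.isalpha())
--         count += table.get((len(s), idx, s[idx]), 0)
--     return count
-- ===== Notes on version B (the rewrite author's own statement) =====
-- stated objective: faster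
-- what changed: B makes one pass over the word list building a table keyed by (word length, position, character) that accumulates first-occurrence 1-based indices (first index kept via a dict instead of repeated list.index scans), so each puzzle line is answered by a single dictionary lookup instead of A's per-puzzle scan over all words with an O(n) words.index call per match.
-- outside the precondition, e.g. on complete_crossword(['x'], ['']): A returns 0, B raises ValueError
import Mathlib
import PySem

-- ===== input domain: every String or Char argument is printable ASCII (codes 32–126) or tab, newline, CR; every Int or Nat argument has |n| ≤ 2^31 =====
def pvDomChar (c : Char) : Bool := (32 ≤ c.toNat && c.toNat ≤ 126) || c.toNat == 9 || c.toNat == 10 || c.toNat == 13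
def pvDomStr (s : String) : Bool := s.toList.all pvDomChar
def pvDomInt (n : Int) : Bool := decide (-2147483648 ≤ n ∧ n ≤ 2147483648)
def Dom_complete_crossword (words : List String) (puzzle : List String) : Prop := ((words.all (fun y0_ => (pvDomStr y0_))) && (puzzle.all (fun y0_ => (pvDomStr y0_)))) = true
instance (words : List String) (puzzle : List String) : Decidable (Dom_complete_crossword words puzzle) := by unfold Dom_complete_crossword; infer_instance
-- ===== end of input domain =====

-- B precomputes a table (word-length, position, char) → sum of first-occurrence 1-based indices,
-- replacing A's per-puzzle scan over the word list by a single dictionary lookup per puzzle.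

-- ===== PORT A =====
def complete_crossword (words : List String) (puzzle : List String) : Int :=
  puzzle.foldl (fun count cryptic =>
    let s := PySem.Chars.lstrip cryptic.toList
    let size : Int := s.length
    let key :=
      (PySem.List.enumerate s).foldl
        (fun k p => if PySem.Chars.isalpha p.2 then some (p.2, p.1) else k)
        (none : Option (Char × Int))
    let new_words := words.filter (fun w => (w.toList.length : Int) == size)
    match key with
    | none => count   -- Python raises KeyError here when new_words ≠ []; excluded by Pre_
    | some (letter, idx) =>
      (PySem.List.enumerate new_words).foldl
        (fun c p =>
          if PySem.List.pyGetD p.2.toList idx ' ' == letter then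
            c + ((((PySem.List.index? words p.2).getD 0 : Nat) : Int) + 1)
          else c) count) 0

-- ===== PORT B =====
def complete_crossword_alt (words : List String) (puzzle : List String) : Int :=
  let st := (PySem.List.enumerate words).foldl
    (fun (st : PySem.Dict String Int × PySem.Dict (Int × Int × Char) Int) iw =>
      let w := iw.2.toList
      let fi := (st.1.get? iw.2).getD iw.1          -- first.setdefault(w, i) returns this value
      let first := st.1.setdefault iw.2 iw.1
      let table := (PySem.List.enumerate w).foldl
        (fun t pc =>
          let k : Int × Int × Char := ((w.length : Int), pc.1, pc.2)
          t.insert k (t.getD k 0 + fi + 1)) st.2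
      (first, table))
    ((PySem.Dict.empty, PySem.Dict.empty) : PySem.Dict String Int × PySem.Dict (Int × Int × Char) Int)
  puzzle.foldl (fun count cryptic =>
    let s := PySem.Chars.lstrip cryptic.toList
    match PySem.List.max? (((PySem.List.enumerate s).filter (fun p => PySem.Chars.isalpha p.2)).map (·.1)) (fun x => x) with
    | none => count   -- Python's max over an empty generator raises ValueError; excluded by Pre_
    | some idx => count + st.2.getD ((s.length : Int), idx, PySem.List.pyGetD s idx ' ') 0) 0

-- ===== PRECONDITION & SPEC =====
-- Pre_ excludes puzzles whose left-stripped text contains no alphabetic character: there A raises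
-- KeyError whenever some word matches the puzzle's length (and otherwise skips the clue only by
-- accident), while B's max over an empty generator raises ValueError.
def Pre_complete_crossword (words : List String) (puzzle : List String) : Prop :=
  ∀ c ∈ puzzle, (PySem.Chars.lstrip c.toList).any PySem.Chars.isalpha = true
instance (words : List String) (puzzle : List String) : Decidable (Pre_complete_crossword words puzzle) := by unfold Pre_complete_crossword; infer_instance
def pvWitness_complete_crossword : List String × List String := (["ab", "xy", "ab"], [" ab", "x?"])

def Spec_complete_crossword (words : List String) (puzzle : List String) (out : Int) : Prop := out = complete_crossword_alt words puzzle
instance (words : List String) (puzzle : List String) (out : Int) : Decidable (Spec_complete_crossword words puzzle out) := by unfold Spec_complete_crossword; infer_instance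

-- ===== CLAIM (what is proved, stated in full; the proofs are below) =====
def Claim_equal_complete_crossword : Prop := ∀ (words : List String) (puzzle : List String), Dom_complete_crossword words puzzle → Pre_complete_crossword words puzzle → Spec_complete_crossword words puzzle (complete_crossword words puzzle)

-- ===== LEMMAS AND PROOFS =====

-- a fold over enumerate that only uses the element is a fold over the list
theorem pv_foldl_enum_snd {α β : Type} (l : List α) (s : Int) (g : β → α → β) (init : β) :
    (PySem.List.enumerate l s).foldl (fun a p => g a p.2) init = l.foldl g init := by
  induction l generalizing s init with
  | nil => simp [PySem.List.enumerate_nil]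
  | cons x xs ih => simp [PySem.List.enumerate_cons, ih]

-- the additive table update over one word
theorem pv_getD_addTable {α : Type} (l : List α) (k : α → Int × Int × Char) (fi : Int)
    (t : PySem.Dict (Int × Int × Char) Int) (q : Int × Int × Char) :
    (l.foldl (fun t x => t.insert (k x) (t.getD (k x) 0 + fi + 1)) t).getD q 0
      = t.getD q 0 + (l.countP (fun x => k x == q) : Int) * (fi + 1) := by
  induction l generalizing t with
  | nil => simp
  | cons x xs ih =>
    simp only [List.foldl_cons, ih, PySem.Dict.getD_insert, List.countP_cons]
    by_cases h : q = k x
    · simp [h]; ring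
    · have h' : (k x == q) = false := by simp; exact fun hh => h hh.symm
      simp [h, h']

theorem pv_countP_unique (l : List Int) (p : Int → Bool) (idx : Int)
    (hl : l.Nodup) (h : ∀ x, p x = true → x = idx) :
    l.countP p = if idx ∈ l ∧ p idx then 1 else 0 := by
  induction l with
  | nil => simp
  | cons x t ih =>
    rw [List.countP_cons]
    rcases List.nodup_cons.mp hl with ⟨hx, ht⟩
    cases px : p x with
    | true =>
      have hxe : x = idx := h x px
      subst hxe
      have hz : t.countP p = 0 := List.countP_eq_zero.mpr (fun y hy hpy => absurd ((h y hpy) ▸ hy) hx)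
      simp [hz, px]
    | false =>
      rw [ih ht]
      by_cases hp : p idx = true
      · have hne : idx ≠ x := fun e => by rw [← e] at px; rw [px] at hp; exact Bool.false_ne_true hp
        simp [List.mem_cons, hp, fun (e : idx = x) => hne e]
      · simp [hp]

-- counting positions of one word that hit the puzzle key
theorem pv_countP_key (w : List Char) (size idx : Int) (letter : Char)
    (h0 : 0 ≤ idx) (hlt : idx < size) :
    ((PySem.List.enumerate w).countP
        (fun pc => ((w.length : Int), pc.1, pc.2) == (size, idx, letter)) : Int)
      = if (w.length : Int) = size ∧ PySem.List.pyGetD w idx ' ' = letter then 1 else 0 := by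
  rw [PySem.List.enumerate_eq_map_pyRange w ' ', List.countP_map]
  by_cases h : (w.length : Int) = size
  · have hlen : PySem.List.pyRange 0 (PySem.List.len w) 1 = PySem.List.pyRange 0 (w.length : Int) 1 := by
      simp [pysem]
    rw [Function.comp_def, hlen,
        pv_countP_unique (PySem.List.pyRange 0 (w.length : Int) 1)
          (fun j => (((w.length : Int), j, PySem.List.pyGetD w j ' ') == (size, idx, letter)))
          idx (PySem.List.nodup_pyRange_one 0 _)
          (fun x hx => by
            have hx' := beq_iff_eq.mp hx
            simp only [Prod.ext_iff] at hx'
            exact hx'.2.1)]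
    by_cases hg : PySem.List.pyGetD w idx ' ' = letter
    · simp [hg, h, h0, hlt]
    · simp [hg, h, h0, hlt]
  · have hz : ((PySem.List.pyRange 0 (PySem.List.len w) 1).countP
        ((fun pc => (((w.length : Int), pc.1, pc.2) == (size, idx, letter))) ∘
          (fun j => (j, PySem.List.pyGetD w j ' ')))) = 0 := by
      refine List.countP_eq_zero.mpr (fun j _ => ?_)
      simp only [Function.comp, beq_iff_eq]
      intro hc
      exact h (congrArg Prod.fst hc)
    simp [h]



-- first-occurrence index of words[i] among the first i+1 words is its overall first index
theorem pv_fi_step (pre rest : List String) (w : String) :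
    (((PySem.List.index? pre w).map (fun n => (n : Int))).getD (pre.length : Int))
      = (((PySem.List.index? (pre ++ w :: rest) w).getD 0 : Nat) : Int) := by
  by_cases h : w ∈ pre
  · rw [PySem.List.index?_append_of_mem _ h]
    obtain ⟨k, hk⟩ := Option.isSome_iff_exists.mp ((PySem.List.index?_isSome_iff pre w).mpr h)
    simp only [PySem.List.index?_eq_idxOf?] at hk
    simp [hk]
  · have h1 : PySem.List.index? pre w = none := (PySem.List.index?_eq_none_iff pre _).mpr h
    have h2 : PySem.List.index? (pre ++ w :: rest) w = some pre.length := by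
      have : pre ++ w :: rest = (pre ++ [w]) ++ rest := by simp
      rw [this, PySem.List.index?_append_of_mem _ (by simp),
          PySem.List.index?_append_singleton_self pre w h]
    simp only [PySem.List.index?_eq_idxOf?] at h1 h2
    simp [h1, h2]

-- the first-index dictionary invariant survives one setdefault step
theorem pv_first_step (pre : List String) (w : String) (f : PySem.Dict String Int)
    (hf : ∀ w', f.get? w' = (PySem.List.index? pre w').map (fun n => (n : Int))) :
    ∀ w', (f.setdefault w (pre.length : Int)).get? w'
      = (PySem.List.index? (pre ++ [w]) w').map (fun n => (n : Int)) := by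
  intro w'
  by_cases hw : w' = w
  · subst hw
    rw [PySem.Dict.get?_setdefault_self, hf]
    by_cases h : w' ∈ pre
    · obtain ⟨k, hk⟩ := Option.isSome_iff_exists.mp ((PySem.List.index?_isSome_iff pre w').mpr h)
      rw [PySem.List.index?_append_of_mem _ h]
      simp only [PySem.List.index?_eq_idxOf?] at hk
      simp [hk]
    · have h1 : PySem.List.index? pre w' = none := (PySem.List.index?_eq_none_iff pre _).mpr h
      rw [PySem.List.index?_append_singleton_self pre w' h]
      simp only [PySem.List.index?_eq_idxOf?] at h1
      simp [h1]
  · rw [PySem.Dict.get?_setdefault_of_ne _ _ hw, hf]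
    by_cases h : w' ∈ pre
    · rw [PySem.List.index?_append_of_mem _ h]
    · have h1 : PySem.List.index? pre w' = none := (PySem.List.index?_eq_none_iff pre _).mpr h
      have h2 : PySem.List.index? (pre ++ [w]) w' = none := by
        refine (PySem.List.index?_eq_none_iff _ _).mpr ?_
        simp [h, hw]
      rw [h1, h2]

-- the table built by B's first pass, read at any key
theorem pv_tableB (words : List String) (q : Int × Int × Char) :
    ∀ (rest pre : List String) (f : PySem.Dict String Int) (t : PySem.Dict (Int × Int × Char) Int),
      pre ++ rest = words →
      (∀ w', f.get? w' = (PySem.List.index? pre w').map (fun n => (n : Int))) →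
      ((PySem.List.enumerate rest (pre.length : Int)).foldl
        (fun (st : PySem.Dict String Int × PySem.Dict (Int × Int × Char) Int) iw =>
          let w := iw.2.toList
          let fi := (st.1.get? iw.2).getD iw.1
          let first := st.1.setdefault iw.2 iw.1
          let table := (PySem.List.enumerate w).foldl
            (fun t pc =>
              let k : Int × Int × Char := ((w.length : Int), pc.1, pc.2)
              t.insert k (t.getD k 0 + fi + 1)) st.2
          (first, table)) (f, t)).2.getD q 0
      = t.getD q 0 + (rest.map (fun w =>
          ((PySem.List.enumerate w.toList).countP
            (fun pc => ((w.toList.length : Int), pc.1, pc.2) == q) : Int)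
            * ((((PySem.List.index? words w).getD 0 : Nat) : Int) + 1))).sum := by
  intro rest
  induction rest with
  | nil => intro pre f t hpre hf; simp [PySem.List.enumerate_nil]
  | cons w rest' ih =>
    intro pre f t hpre hf
    subst hpre
    rw [PySem.List.enumerate_cons, List.foldl_cons]
    have hpre' : (pre ++ [w]) ++ rest' = pre ++ w :: rest' := by simp
    have hf' := pv_first_step pre w f hf
    have ih' := ih (pre ++ [w]) (f.setdefault w (pre.length : Int))
      (List.foldl (fun t pc => t.insert ((w.toList.length : Int), pc.1, pc.2)
          (t.getD ((w.toList.length : Int), pc.1, pc.2) 0 + ((f.get? w).getD (pre.length : Int)) + 1)) t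
        (PySem.List.enumerate w.toList))
      hpre' hf'
    have hlen : ((pre ++ [w]).length : Int) = (pre.length : Int) + 1 := by simp
    rw [hlen] at ih'
    dsimp only
    rw [ih', pv_getD_addTable (PySem.List.enumerate w.toList)
          (fun pc => ((w.toList.length : Int), pc.1, pc.2))
          ((f.get? w).getD (pre.length : Int)) t q]
    have hfi : ((f.get? w).getD (pre.length : Int))
        = (((PySem.List.index? (pre ++ w :: rest') w).getD 0 : Nat) : Int) := by
      rw [hf w]; exact pv_fi_step pre rest' w
    rw [hfi]
    simp only [List.map_cons, List.sum_cons]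
    ring

theorem pv_max?_append_singleton (l : List Int) (a : Int) (h : ∀ x ∈ l, x ≤ a) :
    PySem.List.max? (l ++ [a]) (fun x => x) = some a := by
  cases l with
  | nil => simp [PySem.List.max?_id_cons]
  | cons x t =>
    rw [List.cons_append, PySem.List.max?_id_cons, List.foldl_append]
    have hle : List.foldl max x t ≤ a := by
      rcases PySem.List.foldl_max_mem t x with hm | hm
      · rw [hm]; exact h x (by simp)
      · exact h _ (by simp [hm])
    simp [max_eq_right hle]

-- A's key-search loop equals B's max-of-alpha-indices
theorem pv_key_eq (s : List Char) :
    (PySem.List.enumerate s).foldl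
        (fun k p => if PySem.Chars.isalpha p.2 then some (p.2, p.1) else k)
        (none : Option (Char × Int))
      = (PySem.List.max? (((PySem.List.enumerate s).filter (fun p => PySem.Chars.isalpha p.2)).map (·.1)) (fun x => x)).map
          (fun j => (PySem.List.pyGetD s j ' ', j)) := by
  induction s using List.reverseRecOn with
  | nil => simp [PySem.List.enumerate_nil]
  | append_singleton s c ih =>
    have hbound : ∀ x ∈ ((PySem.List.enumerate s).filter (fun p => PySem.Chars.isalpha p.2)).map (·.1),
        ∃ k : Nat, k < s.length ∧ x = (k : Int) := by
      intro x hx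
      simp only [List.mem_map, List.mem_filter] at hx
      obtain ⟨p, ⟨hp, _⟩, rfl⟩ := hx
      obtain ⟨k, hk, rfl⟩ := (PySem.List.mem_enumerate_iff s 0 p).mp hp
      exact ⟨k, hk, by simp⟩
    rw [PySem.List.enumerate_append]
    have he : PySem.List.enumerate [c] (0 + (s.length : Int)) = [((s.length : Int), c)] := by
      simp [PySem.List.enumerate_cons, PySem.List.enumerate_nil]
    rw [he]
    simp only [List.foldl_append, List.filter_append, List.map_append,
      List.foldl_cons, List.foldl_nil, List.filter_cons, List.filter_nil]
    by_cases hc : PySem.Chars.isalpha c = true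
    · simp only [hc, if_pos, List.map_cons, List.map_nil]
      rw [pv_max?_append_singleton _ _ (by
        intro x hx
        obtain ⟨k, hk, rfl⟩ := hbound x hx
        exact_mod_cast Nat.le_of_lt hk)]
      have hg : PySem.List.pyGetD (s ++ [c]) ((s.length : Int)) ' ' = c := by
        rw [PySem.List.pyGetD_natCast]
        simp [List.getD]
      simp [hg]
    · simp only [hc, Bool.false_eq_true, if_false]
      rw [List.map_nil, List.append_nil, ih]
      cases hm : PySem.List.max?
          (((PySem.List.enumerate s).filter (fun p => PySem.Chars.isalpha p.2)).map (·.1))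
          (fun x => x) with
      | none => simp
      | some j =>
        obtain ⟨k, hk, rfl⟩ := hbound j (PySem.List.max?_mem hm)
        have hg : PySem.List.pyGetD (s ++ [c]) ((k : Nat) : Int) ' ' = PySem.List.pyGetD s ((k : Nat) : Int) ' ' := by
          rw [PySem.List.pyGetD_natCast, PySem.List.pyGetD_natCast]
          simp [List.getD, List.getElem?_append_left hk]
        simp [hg]


theorem pv_sum_ite {α : Type} (l : List α) (p : α → Prop) [DecidablePred p] (f : α → Int) :
    (l.map (fun x => if p x then f x else 0)).sum = ((l.filter (fun x => decide (p x))).map f).sum := by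
  induction l with
  | nil => simp
  | cons x xs ih =>
    by_cases h : p x <;> simp [h, ih]

-- ===== VERDICT (by name: the statement is the Claim_ definition above) =====
theorem complete_crossword_spec : Claim_equal_complete_crossword := by
  unfold Claim_equal_complete_crossword
  intro words puzzle _ _
  unfold Spec_complete_crossword complete_crossword complete_crossword_alt
  dsimp only
  refine PySem.List.foldl_congr_mem _ _ _ _ ?_
  intro count cryptic _
  dsimp only
  rw [pv_key_eq (PySem.Chars.lstrip cryptic.toList)]
  cases hmax : PySem.List.max?
      (((PySem.List.enumerate (PySem.Chars.lstrip cryptic.toList)).filter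
          (fun p => PySem.Chars.isalpha p.2)).map (·.1)) (fun x => x) with
  | none => rfl
  | some idx =>
    dsimp only [Option.map_some]
    have hidx : ∃ k : Nat, k < (PySem.Chars.lstrip cryptic.toList).length ∧ idx = (k : Int) := by
      have hm := PySem.List.max?_mem hmax
      simp only [List.mem_map, List.mem_filter] at hm
      obtain ⟨p, ⟨hp, _⟩, rfl⟩ := hm
      obtain ⟨k, hk, rfl⟩ := (PySem.List.mem_enumerate_iff _ 0 p).mp hp
      exact ⟨k, hk, by simp⟩
    obtain ⟨k, hk, rfl⟩ := hidx
    have htbl := pv_tableB words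
      ((((PySem.Chars.lstrip cryptic.toList).length : Nat) : Int), ((k : Nat) : Int),
        PySem.List.pyGetD (PySem.Chars.lstrip cryptic.toList) ((k : Nat) : Int) ' ')
      words [] PySem.Dict.empty PySem.Dict.empty (by simp) (by
        intro w'
        simp [PySem.List.index?, PySem.Dict.get?, PySem.Dict.empty])
    simp only [List.length_nil, Nat.cast_zero] at htbl
    rw [htbl]
    rw [pv_foldl_enum_snd _ 0
      (fun c w => if (PySem.List.pyGetD w.toList ((k : Nat) : Int) ' '
            == PySem.List.pyGetD (PySem.Chars.lstrip cryptic.toList) ((k : Nat) : Int) ' ') = true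
          then c + ((((PySem.List.index? words w).getD 0 : Nat) : Int) + 1) else c)]
    rw [PySem.List.foldl_if_eq_foldl_filter, PySem.List.foldl_add]
    have hmap : ∀ w ∈ words,
        (((PySem.List.enumerate w.toList).countP
            (fun pc => ((w.toList.length : Int), pc.1, pc.2)
              == (((PySem.Chars.lstrip cryptic.toList).length : Int), ((k : Nat) : Int),
                   PySem.List.pyGetD (PySem.Chars.lstrip cryptic.toList) ((k : Nat) : Int) ' ')) : Nat) : Int)
          * ((((PySem.List.index? words w).getD 0 : Nat) : Int) + 1)
        = if ((w.toList.length : Int) = ((PySem.Chars.lstrip cryptic.toList).length : Int)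
              ∧ PySem.List.pyGetD w.toList ((k : Nat) : Int) ' '
                  = PySem.List.pyGetD (PySem.Chars.lstrip cryptic.toList) ((k : Nat) : Int) ' ')
          then (((PySem.List.index? words w).getD 0 : Nat) : Int) + 1 else 0 := by
      intro w _
      rw [pv_countP_key w.toList (((PySem.Chars.lstrip cryptic.toList).length : Nat) : Int)
            ((k : Nat) : Int) _ (by positivity) (by exact_mod_cast hk)]
      split_ifs <;> simp
    rw [List.map_congr_left hmap, pv_sum_ite]
    have hfil : (List.filter
          (fun w => PySem.List.pyGetD w.toList ((k : Nat) : Int) ' '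
              == PySem.List.pyGetD (PySem.Chars.lstrip cryptic.toList) ((k : Nat) : Int) ' ')
          (List.filter (fun w => ((w.toList.length : Int)) == (((PySem.Chars.lstrip cryptic.toList).length : Nat) : Int)) words))
        = List.filter (fun w => decide ((w.toList.length : Int) = ((PySem.Chars.lstrip cryptic.toList).length : Int)
              ∧ PySem.List.pyGetD w.toList ((k : Nat) : Int) ' '
                  = PySem.List.pyGetD (PySem.Chars.lstrip cryptic.toList) ((k : Nat) : Int) ' ')) words := by
      rw [List.filter_filter]
      refine List.filter_congr (fun w _ => ?_)
      rw [Bool.eq_iff_iff]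
      by_cases h1 : w.toList.length = (PySem.Chars.lstrip cryptic.toList).length <;>
        by_cases h2 : PySem.List.pyGetD w.toList ((k : Nat) : Int) ' '
            = PySem.List.pyGetD (PySem.Chars.lstrip cryptic.toList) ((k : Nat) : Int) ' ' <;>
        simp only [PySem.List.pyGetD_natCast] at h2 <;> simp [h1, h2, and_comm]
    rw [hfil]
    have hempty : (PySem.Dict.empty : PySem.Dict (Int × Int × Char) Int).getD
        ((((PySem.Chars.lstrip cryptic.toList).length : Nat) : Int), ((k : Nat) : Int),
          PySem.List.pyGetD (PySem.Chars.lstrip cryptic.toList) ((k : Nat) : Int) ' ') 0 = 0 := by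
      simp [pysem]
    rw [hempty]
    ring
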